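-- pv_equiv track=rewrite | github.com/uiynyny/coding | python/csc108/lab5.py | loopy_madness
-- ===== SOURCE A (Python) =====
-- def loopy_madness(string1: str, string2: str) -> str:
--     """
--     Given two strings <string1> and <string2>, return a new string that
--     contains letters from these two strings "interwoven" together, starting with
--     the first character of <string1>. If the two strings are not of equal
--     length, then start looping "backwards-and-forwards" in the shorter string
--     until you come to the end of the longer string.
--
--     "interwoven" (or "interweaving") means constructing a new string by taking
--     the first letter from the first string, adding the first letter of the
--     second string, adding the second letter of the first string,
--     adding the second letter of the second string, and so on.
--
--     "backwards-and-forwards" is a custom looping term. First the loop starts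
--     at position 1 (index 0) and goes until position n (i.e., the end). Once the
--     loop reaches position n, it goes backwards, starting at position n - 1 and
--     goes to position 1 (index 0). This repeats until the two strings are
--     interwoven. For example, the backwards-and-forwards operations of "abc"
--     would be "abcbabcba..."
--
--     Examples:
--         If you are given "abc" and "123", then the output string is "a1b2c3".
--         This is after taking "a" from the first string, adding "1" from the
--         second string, adding "b" from the first string, and so on.
--
--         Things get more interesting when you are given two strings that differ
--         in length. For example, if you are given "abcde" and "12", then the
--         output would be "a1b2c1d2e1". Notice how the shorter string loops
--         around when it runs out of characters, and continues looping until the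
--         longer string is exhausted.
--
--         Another example of the "backwards-and-forwards" implementation given
--         two strings of differing length: "abcdfe" and "123", then the output
--         would be "a1b2c3d2f1e2".
--
--         Note that the first string could be shorter too, for example, given
--         "ab" and "123", the output would be "a1b2a3".
--
--
--     Precondition: both input strings will NOT be empty.
--
--     Hint: a good sanity check is to ensure that your output string is exactly
--     twice the length of the longer input string :)
--     """
--     # ab  12345
--     #  i     j
--     # a1b2a3b4a5
--     i,j = 0,0
--     dir_i, dir_j = 1,1
--     result = ""
--     for _ in range(max(len(string1),len(string2))):
--         if(i >= len(string1)-1):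
--             dir_i = -1
--             i = len(string1)-1
--         elif(i <= 0):
--             dir_i = 1
--             i = 0
--         if(j >= len(string2) - 1):
--             dir_j = -1
--             j = len(string2) - 1
--         elif(j <= 0):
--             dir_j = 1
--             j = 0
--         result += string1[i] + string2[j]
--         i += dir_i
--         j += dir_j
--     return result
-- ===== SOURCE B (Python) =====
-- def loopy_madness(string1: str, string2: str) -> str:
--     def tri(k: int, n: int) -> int:
--         # ping-pong (triangle-wave) index into a string of length n
--         if n == 1:
--             return 0
--         p = k % (2 * n - 2)
--         return p if p < n else 2 * n - 2 - p
--
--     n1, n2 = len(string1), len(string2)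
--     return ''.join(string1[tri(k, n1)] + string2[tri(k, n2)]
--                    for k in range(max(n1, n2)))
-- ===== Notes on version B (the rewrite author's own statement) =====
-- stated objective: simpler
-- what changed: Replaced A's mutable direction-flag state machine (indices and direction variables clamped and flipped each iteration) by a closed-form reflected-modulo triangle index tri(k,n) evaluated independently per position inside one join.
import Mathlib
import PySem

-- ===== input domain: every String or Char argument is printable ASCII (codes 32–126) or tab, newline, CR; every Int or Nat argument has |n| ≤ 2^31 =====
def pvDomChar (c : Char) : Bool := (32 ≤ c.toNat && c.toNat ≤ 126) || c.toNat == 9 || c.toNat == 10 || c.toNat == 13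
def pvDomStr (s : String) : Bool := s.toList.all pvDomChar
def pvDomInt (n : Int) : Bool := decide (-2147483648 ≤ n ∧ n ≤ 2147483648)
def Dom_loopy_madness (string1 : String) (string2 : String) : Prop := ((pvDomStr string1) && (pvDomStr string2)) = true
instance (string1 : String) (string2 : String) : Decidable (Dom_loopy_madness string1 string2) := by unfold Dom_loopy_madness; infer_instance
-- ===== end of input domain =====

-- B replaces A's mutable direction-flag state machine by a closed-form reflected-modulo
-- (triangle-wave) index computed independently for each output position; same cost, simpler.


-- ===== PORT A =====
-- clamp/flip step at the top of A's loop body (the two if/elif blocks, for one string)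
def pvClamp (n : Int) (i : Int) (d : Int) : Int × Int :=
  if i ≥ n - 1 then (n - 1, -1)
  else if i ≤ 0 then (0, 1)
  else (i, d)

-- A's `for _ in range(...)` loop, state (i, dir_i, j, dir_j, result).
-- string1[i] is PySem.List.pyGet?; it is `some _` whenever Pre_ holds (the `.getD ' '`
-- default is reached only on inputs where the Python raises IndexError, excluded by Pre_).
def pvGoA (s1 s2 : List Char) (t : Nat) (i di j dj : Int) (acc : List Char) : List Char :=
  match t with
  | 0 => acc
  | Nat.succ t =>
    let p := pvClamp (s1.length : Int) i di
    let q := pvClamp (s2.length : Int) j dj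
    let c1 := (PySem.List.pyGet? s1 p.1).getD ' '
    let c2 := (PySem.List.pyGet? s2 q.1).getD ' '
    pvGoA s1 s2 t (p.1 + p.2) p.2 (q.1 + q.2) q.2 (acc ++ [c1, c2])

def loopy_madness (string1 : String) (string2 : String) : String :=
  let s1 := string1.toList
  let s2 := string2.toList
  String.ofList (pvGoA s1 s2 (max s1.length s2.length) 0 1 0 1 [])

-- ===== PORT B =====
-- tri(k, n): the ping-pong / triangle-wave index (Source B's helper)
def pvTri (k : Int) (n : Int) : Int :=
  if n = 1 then 0
  else
    let p := PySem.Int.mod k (2 * n - 2)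
    if p < n then p else 2 * n - 2 - p

-- ''.join(string1[tri(k,n1)] + string2[tri(k,n2)] for k in range(max(n1,n2)))
def loopy_madness_alt (string1 : String) (string2 : String) : String :=
  let s1 := string1.toList
  let s2 := string2.toList
  String.ofList ((PySem.List.pyRange 0 (max (s1.length : Int) (s2.length : Int)) 1).flatMap
    (fun k => [(PySem.List.pyGet? s1 (pvTri k (s1.length : Int))).getD ' ',
               (PySem.List.pyGet? s2 (pvTri k (s2.length : Int))).getD ' ']))

-- ===== PRECONDITION & SPEC =====
-- Pre_ excludes exactly the inputs where one string is empty and the other is not: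
-- there both A and B raise IndexError (docstring precondition: the strings are nonempty).
def Pre_loopy_madness (string1 : String) (string2 : String) : Prop :=
  (string1 = "" ↔ string2 = "")
instance (string1 : String) (string2 : String) : Decidable (Pre_loopy_madness string1 string2) := by
  unfold Pre_loopy_madness; infer_instance

def pvWitness_loopy_madness : String × String := ("abcde", "12")

def Spec_loopy_madness (string1 : String) (string2 : String) (out : String) : Prop := out = loopy_madness_alt string1 string2
instance (string1 : String) (string2 : String) (out : String) : Decidable (Spec_loopy_madness string1 string2 out) := by unfold Spec_loopy_madness; infer_instance

-- ===== CLAIM (what is proved, stated in full; the proofs are below) =====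
def Claim_equal_loopy_madness : Prop := ∀ (string1 : String) (string2 : String), Dom_loopy_madness string1 string2 → Pre_loopy_madness string1 string2 → Spec_loopy_madness string1 string2 (loopy_madness string1 string2)

-- ===== LEMMAS AND PROOFS =====

-- Nat version of the triangle index, for reasoning
def pvTriN (k n : Nat) : Nat :=
  if n = 1 then 0
  else
    let p := k % (2 * n - 2)
    if p < n then p else 2 * n - 2 - p

-- direction A's state machine holds after emitting position k
def pvDd (k n : Nat) : Int :=
  if n ≤ 1 then (if k % 2 = 0 then -1 else 1)
  else if k % (2 * n - 2) < n - 1 then 1 else -1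

-- A's (i, dir) state at the START of iteration k (before the clamp/flip block)
def pvSt (k n : Nat) : Int × Int :=
  match k with
  | 0 => (0, 1)
  | Nat.succ j => ((pvTriN j n : Int) + pvDd j n, pvDd j n)

theorem pvTri_natCast (k n : Nat) (hn : 1 ≤ n) :
    pvTri (k : Int) (n : Int) = (pvTriN k n : Int) := by
  unfold pvTri pvTriN
  rcases Nat.lt_or_ge n 2 with h | h
  · have : n = 1 := by omega
    subst this; simp
  · have hne : (n : Int) ≠ 1 := by exact_mod_cast (by omega : n ≠ 1)
    have hP : (2 * (n : Int) - 2) = ((2 * n - 2 : Nat) : Int) := by omega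
    rw [if_neg hne, if_neg (by omega : ¬ n = 1)]
    simp only [hP, PySem.Int.mod_natCast]
    have hm := Nat.mod_lt k (y := 2 * n - 2) (by omega)
    split_ifs <;> omega

theorem pvMod_succ (k P : Nat) (hP : 2 ≤ P) :
    (k + 1) % P = if k % P + 1 = P then 0 else k % P + 1 := by
  have hm := Nat.mod_lt k (y := P) (by omega)
  have h1 : 1 % P = 1 := Nat.mod_eq_of_lt (by omega)
  rw [Nat.add_mod, h1]
  split_ifs with h
  · rw [h, Nat.mod_self]
  · exact Nat.mod_eq_of_lt (by omega)

-- the clamp/flip block turns the state at step k into (triangle index, direction)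
theorem pvClamp_st (n k : Nat) (hn : 1 ≤ n) :
    pvClamp (n : Int) (pvSt k n).1 (pvSt k n).2 = ((pvTriN k n : Int), pvDd k n) := by
  rcases Nat.lt_or_ge n 2 with h2 | h2
  · have : n = 1 := by omega
    subst this
    cases k with
    | zero => simp [pvSt, pvClamp, pvTriN, pvDd]
    | succ j =>
      simp only [pvSt, pvClamp, pvTriN, pvDd]
      have hj := Nat.mod_two_eq_zero_or_one j
      have hj1 := Nat.mod_two_eq_zero_or_one (j + 1)
      split_ifs <;> simp_all <;> omega
  · have hn1 : ¬ n ≤ 1 := by omega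
    have hP : 2 ≤ 2 * n - 2 := by omega
    cases k with
    | zero =>
      simp only [pvSt, pvClamp, pvTriN, pvDd, if_neg (by omega : ¬ n = 1), if_neg hn1]
      have h0 : 0 % (2 * n - 2) = 0 := Nat.zero_mod _
      split_ifs <;> simp_all [Prod.mk.injEq]
    | succ j =>
      simp only [pvSt, pvClamp, pvTriN, pvDd, if_neg (by omega : ¬ n = 1), if_neg hn1]
      have hm : j % (2 * n - 2) < 2 * n - 2 := Nat.mod_lt j (by omega)
      have hs := pvMod_succ j (2 * n - 2) hP
      generalize hp : j % (2 * n - 2) = p at hm hs ⊢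
      generalize hq : (j + 1) % (2 * n - 2) = q at hs ⊢
      split_ifs at hs ⊢ <;> simp only [Prod.mk.injEq, and_true] <;> (try trivial) <;> omega

-- A's loop, started at step k in the invariant state, emits the triangle-indexed characters
theorem pvGoA_spec (s1 s2 : List Char) (h1 : 1 ≤ s1.length) (h2 : 1 ≤ s2.length) :
    ∀ (t k : Nat) (acc : List Char),
      pvGoA s1 s2 t (pvSt k s1.length).1 (pvSt k s1.length).2
                    (pvSt k s2.length).1 (pvSt k s2.length).2 acc =
      acc ++ (List.range' k t).flatMap
        (fun k => [(PySem.List.pyGet? s1 (pvTriN k s1.length : Int)).getD ' ',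
                   (PySem.List.pyGet? s2 (pvTriN k s2.length : Int)).getD ' ']) := by
  intro t
  induction t with
  | zero => intro k acc; simp [pvGoA]
  | succ t ih =>
    intro k acc
    rw [pvGoA]
    simp only [pvClamp_st s1.length k h1, pvClamp_st s2.length k h2]
    have hst : ∀ n, ((pvTriN k n : Int) + pvDd k n, pvDd k n) = pvSt (k + 1) n := by
      intro n; rfl
    have := ih (k + 1)
      (acc ++ [(PySem.List.pyGet? s1 (pvTriN k s1.length : Int)).getD ' ',
               (PySem.List.pyGet? s2 (pvTriN k s2.length : Int)).getD ' '])
    simp only [pvSt] at this ⊢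
    rw [this, List.range'_succ]
    simp

-- ===== VERDICT (by name: the statement is the Claim_ definition above) =====
theorem loopy_madness_spec : Claim_equal_loopy_madness := by
  intro string1 string2 _ hpre
  unfold Spec_loopy_madness loopy_madness loopy_madness_alt
  unfold Pre_loopy_madness at hpre
  by_cases hemp : string1 = ""
  · have he2 : string2 = "" := hpre.mp hemp
    subst hemp; subst he2; decide
  · have hne2 : string2 ≠ "" := fun h => hemp (hpre.mpr h)
    have h1 : 1 ≤ string1.toList.length := by
      rcases hl : string1.toList with _ | _
      · exact absurd (String.toList_eq_nil_iff.mp hl) hemp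
      · simp
    have h2 : 1 ≤ string2.toList.length := by
      rcases hl : string2.toList with _ | _
      · exact absurd (String.toList_eq_nil_iff.mp hl) hne2
      · simp
    dsimp only
    generalize hg1 : string1.toList = s1 at h1 ⊢
    generalize hg2 : string2.toList = s2 at h2 ⊢
    have hmax : (max (s1.length : Int) (s2.length : Int)) = ((max s1.length s2.length : Nat) : Int) := by
      omega
    have hA := pvGoA_spec s1 s2 h1 h2 (max s1.length s2.length) 0 []
    simp only [pvSt] at hA
    rw [hA, hmax, PySem.List.pyRange_one]
    have hc1 : ∀ k : Nat, pvTri (k : Int) (s1.length : Int) = (pvTriN k s1.length : Int) :=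
      fun k => pvTri_natCast k s1.length h1
    have hc2 : ∀ k : Nat, pvTri (k : Int) (s2.length : Int) = (pvTriN k s2.length : Int) :=
      fun k => pvTri_natCast k s2.length h2
    simp only [Int.sub_zero, Int.toNat_natCast, List.flatMap_map,
      Int.zero_add, hc1, hc2]
    rw [List.range_eq_range']
    simp
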